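-- pv_equiv track=rewrite | github.com/MrBrantCode/unitest_baseline | mut_generate/mist_train_taco/taco_15821/solution.py | max_subsequence_substring
-- ===== SOURCE A (Python) =====
-- def max_subsequence_substring(X: str, Y: str, N: int, M: int) -> int:
--     dp = [[0 for _ in range(M + 1)] for _ in range(N + 1)]
--     res = 0
--
--     for i in range(1, N + 1):
--         for j in range(1, M + 1):
--             if X[i - 1] == Y[j - 1]:
--                 dp[i][j] = 1 + dp[i - 1][j - 1]
--                 res = max(res, dp[i][j])
--             else:
--                 dp[i][j] = dp[i - 1][j]
--
--     return res
-- ===== SOURCE B (Python) =====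
-- def max_subsequence_substring(X: str, Y: str, N: int, M: int) -> int:
--     # Greedy per-start scan instead of a 2D DP table: for each start a in Y,
--     # greedily match Y[a], Y[a+1], ... as a subsequence of X[:N], keep the best count.
--     if N <= 0 or M <= 0:
--         return 0
--     res = 0
--     for a in range(M):
--         t = 0
--         for i in range(N):
--             c = X[i]
--             if a + t < M and c == Y[a + t]:
--                 t += 1
--         if t > res:
--             res = t
--     return res
-- ===== Notes on version B (the rewrite author's own statement) =====
-- stated objective: alternative
-- what changed: Replaced the (N+1)x(M+1) dynamic-programming table (dp[i][j] = longest suffix of Y[:j] that is a subsequence of X[:i]) by a per-start greedy two-pointer scan: for each start a in Y, greedily match Y[a], Y[a+1], ... as a subsequence of X[:N] and keep the best count, with O(1) extra memory instead of the table.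
import Mathlib
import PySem

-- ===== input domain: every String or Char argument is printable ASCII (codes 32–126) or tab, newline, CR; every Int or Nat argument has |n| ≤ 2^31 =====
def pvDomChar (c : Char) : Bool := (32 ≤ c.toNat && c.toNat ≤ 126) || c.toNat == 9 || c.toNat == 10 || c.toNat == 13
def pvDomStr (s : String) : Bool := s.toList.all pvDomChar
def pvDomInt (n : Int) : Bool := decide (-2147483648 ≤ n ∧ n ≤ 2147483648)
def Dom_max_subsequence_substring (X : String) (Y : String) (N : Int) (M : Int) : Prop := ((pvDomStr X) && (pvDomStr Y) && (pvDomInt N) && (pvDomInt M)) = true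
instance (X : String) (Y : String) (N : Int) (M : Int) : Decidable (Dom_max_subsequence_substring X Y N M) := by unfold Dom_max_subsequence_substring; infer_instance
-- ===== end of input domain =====

-- B replaces A's (N+1)×(M+1) DP table by a per-start greedy two-pointer scan over Y (same return value).

-- ===== PORT A =====
-- dp[i][j] read / write on the list-of-lists table (indices are nonnegative at every use)
def pvGet2 (dp : List (List Int)) (i j : Int) : Int :=
  PySem.List.pyGetD (PySem.List.pyGetD dp i []) j 0

def pvSet2 (dp : List (List Int)) (i j : Int) (v : Int) : List (List Int) :=
  PySem.List.pySetD dp i (PySem.List.pySetD (PySem.List.pyGetD dp i []) j v)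

def max_subsequence_substring (X : String) (Y : String) (N : Int) (M : Int) : Int :=
  let dp0 : List (List Int) :=
    (PySem.List.pyRange 0 (N + 1) 1).map (fun _ => (PySem.List.pyRange 0 (M + 1) 1).map (fun _ => (0 : Int)))
  ((PySem.List.pyRange 1 (N + 1) 1).foldl (fun (st : List (List Int) × Int) i =>
    (PySem.List.pyRange 1 (M + 1) 1).foldl (fun (st : List (List Int) × Int) j =>
      if PySem.Str.pyGet? X (i - 1) = PySem.Str.pyGet? Y (j - 1) then
        let v := 1 + pvGet2 st.1 (i - 1) (j - 1)
        (pvSet2 st.1 i j v, max st.2 v)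
      else
        (pvSet2 st.1 i j (pvGet2 st.1 (i - 1) j), st.2)) st) (dp0, 0)).2

-- ===== PORT B =====
def max_subsequence_substring_alt (X : String) (Y : String) (N : Int) (M : Int) : Int :=
  if N ≤ 0 ∨ M ≤ 0 then 0
  else (PySem.List.pyRange 0 M 1).foldl (fun res a =>
    let t := (PySem.List.pyRange 0 N 1).foldl (fun t i =>
      let c := PySem.Str.pyGet? X i
      if a + t < M ∧ c = PySem.Str.pyGet? Y (a + t) then t + 1 else t) 0
    if t > res then t else res) 0

-- ===== PRECONDITION & SPEC =====
-- Pre_ excludes exactly the inputs where Python A raises IndexError: both loops run (N ≥ 1 and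
-- M ≥ 1) while N exceeds len(X) or M exceeds len(Y).
def Pre_max_subsequence_substring (X : String) (Y : String) (N : Int) (M : Int) : Prop :=
  1 ≤ N → 1 ≤ M → (N ≤ PySem.Str.len X ∧ M ≤ PySem.Str.len Y)
instance (X : String) (Y : String) (N : Int) (M : Int) : Decidable (Pre_max_subsequence_substring X Y N M) := by
  unfold Pre_max_subsequence_substring; infer_instance

def pvWitness_max_subsequence_substring : String × String × Int × Int := ("ab", "ba", 2, 2)

def Spec_max_subsequence_substring (X : String) (Y : String) (N : Int) (M : Int) (out : Int) : Prop := out = max_subsequence_substring_alt X Y N M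
instance (X : String) (Y : String) (N : Int) (M : Int) (out : Int) : Decidable (Spec_max_subsequence_substring X Y N M out) := by unfold Spec_max_subsequence_substring; infer_instance

-- ===== CLAIM (what is proved, stated in full; the proofs are below) =====
def Claim_equal_max_subsequence_substring : Prop := ∀ (X : String) (Y : String) (N : Int) (M : Int), Dom_max_subsequence_substring X Y N M → Pre_max_subsequence_substring X Y N M → Spec_max_subsequence_substring X Y N M (max_subsequence_substring X Y N M)

-- ===== LEMMAS AND PROOFS =====

-- The greedy matcher: scan xs left to right, consume the head of ys on a match.
def pvGreedy : List Char → List Char → Nat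
  | [], _ => 0
  | _ :: _, [] => 0
  | x :: xs, y :: ys => if x = y then pvGreedy xs ys + 1 else pvGreedy xs (y :: ys)

-- A's DP recurrence as a function of the (0-based-length) indices.
def pvDP (xs ys : List Char) : Nat → Nat → Nat
  | 0, _ => 0
  | _ + 1, 0 => 0
  | i + 1, j + 1 => if xs[i]? = ys[j]? then pvDP xs ys i j + 1 else pvDP xs ys i (j + 1)

-- A's running max after processing the first i rows.
def pvRowStep (xs ys : List Char) (i : Nat) (r : Int) (q : Nat) : Int :=
  if xs[i]? = ys[q]? then max r (1 + (pvDP xs ys i q : Int)) else r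

def pvRes (xs ys : List Char) : Nat → Int
  | 0 => 0
  | i + 1 => (List.range ys.length).foldl (pvRowStep xs ys i) (pvRes xs ys i)

-- B's value as a fold of greedy counts over the start positions.
def pvGFold (xs ys : List Char) : Int :=
  (List.range ys.length).foldl (fun r a => max r ((pvGreedy xs (ys.drop a) : Int))) 0

-- generic "conditional running max" fold lemmas
theorem pvFoldMax_ge_init (l : List Nat) (p : Nat → Prop) [DecidablePred p] (v : Nat → Int) (r : Int) :
    r ≤ l.foldl (fun r q => if p q then max r (v q) else r) r := by
  induction l generalizing r with
  | nil => simp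
  | cons a l ih =>
    simp only [List.foldl_cons]
    refine le_trans ?_ (ih _)
    split
    · exact le_max_left _ _
    · exact le_refl _

theorem pvFoldMax_ge_elem (l : List Nat) (p : Nat → Prop) [DecidablePred p] (v : Nat → Int) (r : Int)
    (q : Nat) (hq : q ∈ l) (hp : p q) :
    v q ≤ l.foldl (fun r q => if p q then max r (v q) else r) r := by
  induction l generalizing r with
  | nil => cases hq
  | cons a l ih =>
    simp only [List.foldl_cons]
    rcases List.mem_cons.mp hq with h | h
    · subst h
      refine le_trans ?_ (pvFoldMax_ge_init l p v _)
      simp [hp]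
    · exact ih _ h

theorem pvFoldMax_le (l : List Nat) (p : Nat → Prop) [DecidablePred p] (v : Nat → Int) (r c : Int)
    (h0 : r ≤ c) (h : ∀ q ∈ l, p q → v q ≤ c) :
    l.foldl (fun r q => if p q then max r (v q) else r) r ≤ c := by
  induction l generalizing r with
  | nil => simpa using h0
  | cons a l ih =>
    simp only [List.foldl_cons]
    refine ih _ ?_ (fun q hq hpq => h q (List.mem_cons_of_mem _ hq) hpq)
    split
    · next hpa => exact max_le h0 (h a List.mem_cons_self hpa)
    · exact h0

-- greedy facts
theorem pvGreedy_nil_right (xs : List Char) : pvGreedy xs [] = 0 := by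
  cases xs <;> rfl

theorem pvGreedy_le_length (xs ys : List Char) : pvGreedy xs ys ≤ ys.length := by
  induction xs generalizing ys with
  | nil => simp [pvGreedy]
  | cons x xs ih =>
    cases ys with
    | nil => simp [pvGreedy]
    | cons y ys =>
      by_cases h : x = y
      · simpa [pvGreedy, h] using ih ys
      · simpa [pvGreedy, h] using ih (y :: ys)

theorem pvGreedy_take_sublist (xs ys : List Char) : List.Sublist (ys.take (pvGreedy xs ys)) xs := by
  induction xs generalizing ys with
  | nil => simp [pvGreedy]
  | cons x xs ih =>
    cases ys with
    | nil => simp [pvGreedy]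
    | cons y ys =>
      by_cases h : x = y
      · subst h
        simpa [pvGreedy, List.take_succ_cons] using List.Sublist.cons₂ x (ih ys)
      · simp only [pvGreedy, if_neg h]
        cases hg : pvGreedy xs (y :: ys) with
        | zero => simp
        | succ k =>
          have := ih (y :: ys)
          rw [hg] at this
          exact List.Sublist.cons x this

theorem pvGreedy_is_max (xs ys : List Char) (k : Nat) (hk : k ≤ ys.length)
    (h : List.Sublist (ys.take k) xs) : k ≤ pvGreedy xs ys := by
  induction xs generalizing ys k with
  | nil =>
    have : (ys.take k).length = 0 := by rw [List.sublist_nil.mp h]; rfl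
    simp only [List.length_take] at this
    omega
  | cons x xs ih =>
    cases ys with
    | nil => rw [pvGreedy_nil_right]; simpa using hk
    | cons y ys =>
      cases k with
      | zero => exact Nat.zero_le _
      | succ k =>
        simp only [List.take_succ_cons] at h
        by_cases hxy : x = y
        · subst hxy
          have htail : List.Sublist (ys.take k) xs := by
            cases h with
            | cons _ h' => exact (List.sublist_cons_self _ _).trans h'
            | cons₂ _ h' => exact h'
          have hk' : k ≤ ys.length := by simpa using hk
          simp only [pvGreedy, if_pos]
          exact Nat.succ_le_succ (ih ys k hk' htail)
        · have h' : List.Sublist (y :: ys.take k) xs := by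
            cases h with
            | cons _ h2 => exact h2
            | cons₂ _ h2 => exact absurd rfl hxy
          simp only [pvGreedy, if_neg hxy]
          have : List.Sublist ((y :: ys).take (k+1)) xs := by
            simpa [List.take_succ_cons] using h'
          exact ih (y :: ys) (k+1) hk this

-- the DP is the greedy matcher on the reversed prefixes
theorem pvDP_zero_right (xs ys : List Char) (i : Nat) : pvDP xs ys i 0 = 0 := by
  cases i <;> rfl

theorem pvDP_le_right (xs ys : List Char) (i j : Nat) : pvDP xs ys i j ≤ j := by
  induction i generalizing j with
  | zero => simp [pvDP]
  | succ i ih =>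
    cases j with
    | zero => simp [pvDP]
    | succ j =>
      simp only [pvDP]
      split
      · exact Nat.succ_le_succ (ih j)
      · exact ih (j+1)

theorem pvDP_eq_greedy_rev (xs ys : List Char) (i j : Nat) (hi : i ≤ xs.length) (hj : j ≤ ys.length) :
    pvDP xs ys i j = pvGreedy ((xs.take i).reverse) ((ys.take j).reverse) := by
  induction i generalizing j with
  | zero => simp [pvDP, pvGreedy]
  | succ i ih =>
    have hxi : i < xs.length := hi
    have hxrev : (xs.take (i+1)).reverse = xs[i] :: (xs.take i).reverse := by
      rw [List.take_succ_eq_append_getElem hxi, List.reverse_append]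
      rfl
    cases j with
    | zero => simp [pvDP_zero_right, hxrev, pvGreedy_nil_right]
    | succ j =>
      have hyj : j < ys.length := hj
      have hyrev : (ys.take (j+1)).reverse = ys[j] :: (ys.take j).reverse := by
        rw [List.take_succ_eq_append_getElem hyj, List.reverse_append]
        rfl
      rw [hxrev, hyrev]
      simp only [pvDP, pvGreedy]
      have hopt : (xs[i]? = ys[j]?) ↔ xs[i] = ys[j] := by
        rw [List.getElem?_eq_getElem hxi, List.getElem?_eq_getElem hyj]
        exact Option.some_inj
      by_cases hc : xs[i] = ys[j]
      · rw [if_pos (hopt.mpr hc), if_pos hc, ih j (Nat.le_of_lt hxi) (Nat.le_of_lt hyj)]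
      · rw [if_neg (fun h => hc (hopt.mp h)), if_neg hc, ih (j+1) (Nat.le_of_lt hxi) hj, hyrev]

-- pvRes facts
theorem pvGFold_eq_cond (xs ys : List Char) :
    pvGFold xs ys = (List.range ys.length).foldl
      (fun r a => if (fun (_ : Nat) => True) a then max r ((pvGreedy xs (ys.drop a) : Int)) else r) 0 := by
  unfold pvGFold
  exact PySem.List.foldl_congr_mem _ _ _ _ (by intro acc x _; simp)

theorem pvGFold_nonneg (xs ys : List Char) : 0 ≤ pvGFold xs ys := by
  rw [pvGFold_eq_cond]
  exact pvFoldMax_ge_init _ _ _ _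

theorem pvRes_nonneg (xs ys : List Char) (i : Nat) : 0 ≤ pvRes xs ys i := by
  induction i with
  | zero => simp [pvRes]
  | succ i ih =>
    refine le_trans ih ?_
    have h := pvFoldMax_ge_init (List.range ys.length) (fun q => xs[i]? = ys[q]?)
      (fun q => 1 + (pvDP xs ys i q : Int)) (pvRes xs ys i)
    simpa [pvRes, pvRowStep] using h

theorem pvRes_mono (xs ys : List Char) (i i' : Nat) (h : i ≤ i') : pvRes xs ys i ≤ pvRes xs ys i' := by
  induction i' with
  | zero =>
    have h0 : i = 0 := by omega
    subst h0; exact le_refl _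
  | succ i' ih =>
    rcases Nat.lt_or_ge i (i'+1) with hlt | hge
    · refine le_trans (ih (by omega)) ?_
      have h2 := pvFoldMax_ge_init (List.range ys.length) (fun q => xs[i']? = ys[q]?)
        (fun q => 1 + (pvDP xs ys i' q : Int)) (pvRes xs ys i')
      simpa [pvRes, pvRowStep] using h2
    · have h0 : i = i' + 1 := by omega
      subst h0; exact le_refl _

theorem pvRes_ge_term (xs ys : List Char) (i q : Nat) (hi : i < xs.length) (hq : q < ys.length)
    (h : xs[i]? = ys[q]?) : 1 + (pvDP xs ys i q : Int) ≤ pvRes xs ys xs.length := by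
  have h1 : 1 + (pvDP xs ys i q : Int) ≤ pvRes xs ys (i+1) := by
    have h2 := pvFoldMax_ge_elem (List.range ys.length) (fun q => xs[i]? = ys[q]?)
      (fun q => 1 + (pvDP xs ys i q : Int)) (pvRes xs ys i) q (List.mem_range.mpr hq) h
    simpa [pvRes, pvRowStep] using h2
  exact le_trans h1 (pvRes_mono xs ys (i+1) xs.length hi)

-- each matched DP entry is dominated by some greedy start
theorem pvKey_AB (xs ys : List Char) (i q : Nat) (hi : i < xs.length) (hq : q < ys.length)
    (h : xs[i]? = ys[q]?) : 1 + (pvDP xs ys i q : Int) ≤ pvGFold xs ys := by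
  have hval : pvDP xs ys (i+1) (q+1) = pvDP xs ys i q + 1 := by
    simp only [pvDP, if_pos h]
  set k := pvDP xs ys (i+1) (q+1) with hk
  have hkle : k ≤ q + 1 := pvDP_le_right xs ys (i+1) (q+1)
  have hgr : k ≤ pvGreedy xs (ys.drop (q+1-k)) := by
    have hrev := pvDP_eq_greedy_rev xs ys (i+1) (q+1) hi hq
    have hsub := pvGreedy_take_sublist ((xs.take (i+1)).reverse) ((ys.take (q+1)).reverse)
    rw [← hrev, ← hk] at hsub
    have hlen : (ys.take (q+1)).length = q+1 := by rw [List.length_take]; omega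
    have e1 : ((ys.take (q+1)).reverse).take k = ((ys.take (q+1)).drop (q+1-k)).reverse := by
      rw [List.take_reverse, hlen]
    rw [e1] at hsub
    have hsub2 : List.Sublist ((ys.take (q+1)).drop (q+1-k)) (xs.take (i+1)) :=
      List.reverse_sublist.mp hsub
    have e2 : (ys.take (q+1)).drop (q+1-k) = (ys.drop (q+1-k)).take k := by
      rw [List.drop_take]; congr 1; omega
    rw [e2] at hsub2
    refine pvGreedy_is_max xs (ys.drop (q+1-k)) k ?_ (hsub2.trans (List.take_sublist _ _))
    rw [List.length_drop]; omega
  have hmem : (q+1-k) ∈ List.range ys.length := List.mem_range.mpr (by omega)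
  have hfold := pvFoldMax_ge_elem (List.range ys.length) (fun (_ : Nat) => True)
    (fun a => ((pvGreedy xs (ys.drop a)) : Int)) 0 (q+1-k) hmem trivial
  rw [← pvGFold_eq_cond] at hfold
  calc 1 + (pvDP xs ys i q : Int) = (k : Int) := by rw [hval]; push_cast; ring
  _ ≤ ((pvGreedy xs (ys.drop (q+1-k))) : Int) := by exact_mod_cast hgr
  _ ≤ pvGFold xs ys := hfold

-- each greedy count is dominated by some matched DP entry
theorem pvKey_BA (xs ys : List Char) (a : Nat) (ha : a < ys.length) :
    ((pvGreedy xs (ys.drop a) : Int)) ≤ pvRes xs ys xs.length := by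
  cases hk : pvGreedy xs (ys.drop a) with
  | zero => simpa using pvRes_nonneg xs ys xs.length
  | succ k0 =>
    have hkle : k0 + 1 ≤ (ys.drop a).length := hk ▸ pvGreedy_le_length xs (ys.drop a)
    have hlend : (ys.drop a).length = ys.length - a := List.length_drop
    have hq : a + k0 < ys.length := by omega
    have hsub : List.Sublist ((ys.drop a).take (k0+1)) xs := hk ▸ pvGreedy_take_sublist xs (ys.drop a)
    set s := (ys.drop a).take (k0+1) with hs
    have hslen : s.length = k0 + 1 := by rw [hs, List.length_take]; omega
    have hck : k0 < s.length := by omega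
    have hcval : s[k0] = ys[a+k0] := by
      simp only [hs, List.getElem_take, List.getElem_drop]
    have hdecomp : s = s.take k0 ++ [s[k0]] := by
      have hd1 : s.take (k0+1) = s.take k0 ++ [s[k0]] := List.take_succ_eq_append_getElem hck
      have hd2 : s.take (k0+1) = s := List.take_of_length_le (by omega)
      conv_lhs => rw [← hd2]
      rw [hd1]
    rw [hdecomp] at hsub
    obtain ⟨r1, r2, hxs, h1, h2⟩ := List.append_sublist_iff.mp hsub
    have hc2 : s[k0] ∈ r2 := h2.subset (by simp)
    obtain ⟨u, v, hr2⟩ := List.append_of_mem hc2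
    have hxs2 : xs = (r1 ++ u) ++ s[k0] :: v := by
      rw [hxs, hr2]; simp [List.append_assoc]
    have hilen : (r1 ++ u).length < xs.length := by
      rw [hxs2]; simp only [List.length_append, List.length_cons]; omega
    have hxi : xs[(r1 ++ u).length]? = some s[k0] := by
      rw [hxs2, List.getElem?_append_right (le_refl _)]
      simp
    have hcond : xs[(r1 ++ u).length]? = ys[a+k0]? := by
      rw [hxi, hcval, List.getElem?_eq_getElem hq]
    have htake : xs.take ((r1 ++ u).length + 1) = (r1 ++ u) ++ [s[k0]] := by
      have hlen3 : ((r1 ++ u) ++ [s[k0]]).length = (r1 ++ u).length + 1 := by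
        simp only [List.length_append, List.length_cons, List.length_nil]
      conv_lhs => rw [hxs2]
      have hsplit : (r1 ++ u) ++ s[k0] :: v = ((r1 ++ u) ++ [s[k0]]) ++ v := by simp
      rw [hsplit, ← hlen3, List.take_left]
    have hssub : List.Sublist s (xs.take ((r1 ++ u).length + 1)) := by
      rw [htake]
      have hdd : List.Sublist (s.take k0) (r1 ++ u) :=
        h1.trans (List.sublist_append_left r1 u)
      have := List.Sublist.append hdd (List.Sublist.refl [s[k0]])
      rw [← hdecomp] at this
      exact this
    have hdp : k0 + 1 ≤ pvDP xs ys ((r1 ++ u).length + 1) (a + k0 + 1) := by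
      rw [pvDP_eq_greedy_rev xs ys ((r1 ++ u).length + 1) (a+k0+1) hilen hq]
      apply pvGreedy_is_max
      · rw [List.length_reverse, List.length_take]; omega
      · have hlen2 : (ys.take (a+k0+1)).length = a+k0+1 := by rw [List.length_take]; omega
        rw [List.take_reverse, hlen2]
        have e4 : a + k0 + 1 - (k0+1) = a := by omega
        have e3 : (ys.take (a+k0+1)).drop a = s := by
          rw [List.drop_take, hs]
          congr 1
          omega
        rw [e4, e3]
        exact List.reverse_sublist.mpr hssub
    have hstep : pvDP xs ys ((r1 ++ u).length + 1) (a + k0 + 1)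
        = pvDP xs ys ((r1 ++ u).length) (a + k0) + 1 := by
      simp only [pvDP, if_pos hcond]
    have hfin := pvRes_ge_term xs ys ((r1 ++ u).length) (a+k0) hilen hq hcond
    have hcast : ((k0 + 1 : Nat) : Int) ≤ 1 + (pvDP xs ys ((r1 ++ u).length) (a + k0) : Int) := by
      rw [hstep] at hdp
      push_cast
      omega
    calc (((k0+1 : Nat)) : Int) ≤ 1 + (pvDP xs ys ((r1 ++ u).length) (a + k0) : Int) := hcast
    _ ≤ pvRes xs ys xs.length := hfin

-- the central combinatorial identity: A's DP maximum = B's greedy maximum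
theorem pvRes_eq_gFold (xs ys : List Char) : pvRes xs ys xs.length = pvGFold xs ys := by
  apply le_antisymm
  · suffices h : ∀ i, i ≤ xs.length → pvRes xs ys i ≤ pvGFold xs ys from h _ (le_refl _)
    intro i
    induction i with
    | zero => intro _; simpa [pvRes] using pvGFold_nonneg xs ys
    | succ i ih =>
      intro hi
      have hfold := pvFoldMax_le (List.range ys.length) (fun q => xs[i]? = ys[q]?)
        (fun q => 1 + (pvDP xs ys i q : Int)) (pvRes xs ys i) (pvGFold xs ys) (ih (by omega))
        (fun q hq hpq => pvKey_AB xs ys i q (by omega) (List.mem_range.mp hq) hpq)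
      simpa [pvRes, pvRowStep] using hfold
  · rw [pvGFold_eq_cond]
    exact pvFoldMax_le _ _ _ _ _ (pvRes_nonneg xs ys _)
      (fun a ha _ => pvKey_BA xs ys a (List.mem_range.mp ha))

-- ==== bridge: port B computes pvGFold ====

theorem pvScan_eq (ys : List Char) (M : Int) (hM : M ≤ (ys.length : Int)) (a : Int)
    (ha : 0 ≤ a) :
    ∀ (xs : List Char) (t : Int), 0 ≤ t → a + t ≤ M →
      xs.foldl (fun t c => if a + t < M ∧ some c = PySem.List.pyGet? ys (a + t) then t + 1 else t) t
        = t + (pvGreedy xs ((ys.take M.toNat).drop (a + t).toNat) : Int) := by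
  intro xs
  induction xs with
  | nil =>
    intro t ht hat
    simp [pvGreedy]
  | cons c xs ih =>
    intro t ht hat
    simp only [List.foldl_cons]
    by_cases hlt : a + t < M
    · have hidx : (a+t).toNat < ys.length := by omega
      have hidx2 : (a+t).toNat < (ys.take M.toNat).length := by rw [List.length_take]; omega
      have hget : PySem.List.pyGet? ys (a+t) = some (ys[(a+t).toNat]) :=
        PySem.List.pyGet?_eq_some_getElem ys (by omega) (by exact_mod_cast (by omega : a + t < (ys.length : Int)))
      have hdropcons : (ys.take M.toNat).drop (a+t).toNat
          = ys[(a+t).toNat] :: (ys.take M.toNat).drop ((a+t).toNat + 1) := by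
        rw [List.drop_eq_getElem_cons hidx2, List.getElem_take]
      by_cases hc : c = ys[(a+t).toNat]
      · rw [if_pos ⟨hlt, by rw [hget, hc]⟩]
        rw [ih (t+1) (by omega) (by omega)]
        have e1 : (a + (t+1)).toNat = (a+t).toNat + 1 := by omega
        rw [e1, hdropcons]
        subst hc
        simp only [pvGreedy, if_pos]
        push_cast
        ring
      · have hng : ¬ (a + t < M ∧ some c = PySem.List.pyGet? ys (a + t)) := by
          rintro ⟨-, hsc⟩
          rw [hget] at hsc
          exact hc (Option.some_inj.mp hsc)
        rw [if_neg hng]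
        rw [ih t ht hat, hdropcons]
        simp only [pvGreedy, if_neg hc]
    · rw [if_neg (fun h => hlt h.1)]
      rw [ih t ht hat]
      have hdrop_nil : (ys.take M.toNat).drop (a+t).toNat = [] := by
        apply List.drop_eq_nil_of_le
        rw [List.length_take]
        omega
      rw [hdrop_nil, pvGreedy_nil_right, pvGreedy_nil_right]

theorem pvIfMax (a b : Int) : (if b > a then b else a) = max a b := by
  split <;> omega

theorem pvFoldl_range_some {α β : Type} (xs : List α) (f : β → Option α → β) (b : β) :
    ∀ n, n ≤ xs.length →
      (List.range n).foldl (fun acc k => f acc xs[k]?) b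
        = (xs.take n).foldl (fun acc c => f acc (some c)) b := by
  intro n
  induction n with
  | zero => intro _; simp
  | succ n ih =>
    intro hn
    have hnlt : n < xs.length := hn
    rw [List.range_succ, List.foldl_append, ih (by omega),
        List.take_succ_eq_append_getElem hnlt, List.foldl_append]
    simp [List.getElem?_eq_getElem hnlt]

theorem pvAlt_eq_gFold (X Y : String) (N M : Int) (n m : Nat) (hN : N = (n : Int)) (hM : M = (m : Int))
    (hn : n ≤ X.toList.length) (hm : m ≤ Y.toList.length) (hn1 : 0 < n) (hm1 : 0 < m) :
    max_subsequence_substring_alt X Y N M = pvGFold (X.toList.take n) (Y.toList.take m) := by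
  subst hN hM
  unfold max_subsequence_substring_alt pvGFold
  rw [if_neg (by omega : ¬ ((n:Int) ≤ 0 ∨ (m:Int) ≤ 0))]
  have hylen : (Y.toList.take m).length = m := by rw [List.length_take]; omega
  rw [hylen]
  rw [PySem.List.pyRange_one 0 (m:Int)]
  have hm0 : ((m:Int) - 0).toNat = m := by omega
  rw [hm0, List.foldl_map]
  apply PySem.List.foldl_congr_mem
  intro acc a ha
  have haa : a < m := List.mem_range.mp ha
  simp only [zero_add]
  rw [PySem.List.pyRange_one 0 (n:Int)]
  have hn0 : ((n:Int) - 0).toNat = n := by omega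
  rw [hn0, List.foldl_map]
  simp only [zero_add, PySem.Str.pyGet?, PySem.Chars.pyGet?, PySem.List.pyGet?_natCast]
  rw [pvFoldl_range_some X.toList
    (fun t c => if (a:Int) + t < (m:Int) ∧ c = PySem.List.pyGet? Y.toList ((a:Int) + t) then t + 1 else t)
    0 n hn]
  rw [pvScan_eq Y.toList (m:Int) (by exact_mod_cast hm) (a:Int) (by omega)
    (X.toList.take n) 0 (le_refl 0) (by omega)]
  have e1 : ((a:Int) + 0).toNat = a := by omega
  have e2 : ((m:Int)).toNat = m := by omega
  rw [e1, e2]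
  rw [pvIfMax]
  simp

-- ==== bridge: port A computes pvRes ====

-- partially-written row i: columns 1..j filled, the rest still 0
def pvRow (xs ys : List Char) (i j : Nat) : List Int :=
  (List.range (ys.length + 1)).map (fun q => if q ≤ j then (pvDP xs ys i q : Int) else 0)

-- table state while filling row i (rows < i final, row i filled up to column j, rows > i untouched)
def pvPT (xs ys : List Char) (n i j : Nat) : List (List Int) :=
  (List.range (n + 1)).map (fun p =>
    if p < i then pvRow xs ys p ys.length
    else if p = i then pvRow xs ys i j
    else List.replicate (ys.length + 1) 0)

theorem pvDP_zero_left (xs ys : List Char) (j : Nat) : pvDP xs ys 0 j = 0 := rfl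

theorem pvRow_zero (xs ys : List Char) (i : Nat) : pvRow xs ys i 0 = List.replicate (ys.length + 1) 0 := by
  apply List.eq_replicate_iff.mpr
  refine ⟨by simp [pvRow], ?_⟩
  intro b hb
  simp only [pvRow, List.mem_map] at hb
  obtain ⟨q, hq, rfl⟩ := hb
  by_cases h : q ≤ 0
  · have hq0 : q = 0 := by omega
    subst hq0
    simp [pvDP_zero_right]
  · simp [h]

theorem pvRow_zero_left (xs ys : List Char) (j : Nat) : pvRow xs ys 0 j = List.replicate (ys.length + 1) 0 := by
  apply List.eq_replicate_iff.mpr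
  refine ⟨by simp [pvRow], ?_⟩
  intro b hb
  simp only [pvRow, List.mem_map] at hb
  obtain ⟨q, hq, rfl⟩ := hb
  by_cases h : q ≤ j
  · simp [h, pvDP_zero_left]
  · simp [h]

theorem pvRow_set (xs ys : List Char) (i q : Nat) (v : Int) (_hq : q < ys.length)
    (hv : v = (pvDP xs ys i (q+1) : Int)) :
    (pvRow xs ys i q).set (q+1) v = pvRow xs ys i (q+1) := by
  apply List.ext_getElem
  · simp [pvRow]
  · intro qq h1 h2
    have hqq : qq < ys.length + 1 := by
      simpa [pvRow] using h2
    rw [List.getElem_set]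
    unfold pvRow
    simp only [List.getElem_map, List.getElem_range]
    by_cases h : q + 1 = qq
    · rw [if_pos h, ← h, if_pos (le_refl _), hv]
    · rw [if_neg h]
      by_cases h3 : qq ≤ q
      · rw [if_pos h3, if_pos (by omega)]
      · rw [if_neg h3, if_neg (by omega)]

theorem pvPT_get_lt (xs ys : List Char) (n i j p q' : Nat) (hp : p ≤ n) (hpi : p < i)
    (hq' : q' ≤ ys.length) :
    pvGet2 (pvPT xs ys n i j) (p : Int) (q' : Int) = ((pvDP xs ys p q' : Int)) := by
  unfold pvGet2 pvPT
  simp only [PySem.List.pyGetD_natCast]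
  rw [PySem.List.getD_map_range _ _ _ _ (by omega : p < n+1), if_pos hpi]
  unfold pvRow
  rw [PySem.List.getD_map_range _ _ _ _ (by omega : q' < ys.length+1), if_pos hq']

theorem pvPT_set (xs ys : List Char) (n k q : Nat) (hk : k < n) (hq : q < ys.length) (v : Int)
    (hv : v = (pvDP xs ys (k+1) (q+1) : Int)) :
    pvSet2 (pvPT xs ys n (k+1) q) ((k+1 : Nat) : Int) ((q+1 : Nat) : Int) v
      = pvPT xs ys n (k+1) (q+1) := by
  have hrow : (pvPT xs ys n (k+1) q).getD (k+1) [] = pvRow xs ys (k+1) q := by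
    unfold pvPT
    rw [PySem.List.getD_map_range _ _ _ _ (by omega : k+1 < n+1), if_neg (lt_irrefl _), if_pos rfl]
  unfold pvSet2
  simp only [PySem.List.pyGetD_natCast, PySem.List.pySetD_natCast]
  rw [hrow, pvRow_set xs ys (k+1) q v hq hv]
  apply List.ext_getElem
  · simp [pvPT]
  · intro p h1 h2
    have hp : p < n + 1 := by
      simpa [pvPT] using h2
    rw [List.getElem_set]
    unfold pvPT
    simp only [List.getElem_map, List.getElem_range]
    by_cases hpk : k+1 = p
    · rw [if_pos hpk, ← hpk, if_neg (lt_irrefl _), if_pos rfl]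
    · rw [if_neg hpk]
      by_cases h3 : p < k+1
      · rw [if_pos h3, if_pos h3]
      · rw [if_neg h3, if_neg h3, if_neg (fun h => hpk h.symm), if_neg (fun h => hpk h.symm)]

theorem pvPT_roll (xs ys : List Char) (n i : Nat) :
    pvPT xs ys n i ys.length = pvPT xs ys n (i+1) 0 := by
  apply List.ext_getElem
  · simp [pvPT]
  · intro p h1 h2
    have hp : p < n + 1 := by simpa [pvPT] using h2
    unfold pvPT
    simp only [List.getElem_map, List.getElem_range]
    by_cases hlt : p < i
    · rw [if_pos hlt, if_pos (by omega)]
    · rw [if_neg hlt]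
      by_cases heq : p = i
      · rw [if_pos heq, if_pos (by omega), heq]
      · rw [if_neg heq]
        by_cases hlt2 : p < i + 1
        · omega
        · rw [if_neg hlt2]
          by_cases heq2 : p = i + 1
          · rw [if_pos heq2, pvRow_zero]
          · rw [if_neg heq2]

theorem pvPT_init (xs ys : List Char) (n : Nat) :
    pvPT xs ys n 1 0 = List.replicate (n+1) (List.replicate (ys.length + 1) 0) := by
  apply List.eq_replicate_iff.mpr
  refine ⟨by simp [pvPT], ?_⟩
  intro b hb
  simp only [pvPT, List.mem_map] at hb
  obtain ⟨p, hp, rfl⟩ := hb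
  by_cases h1 : p < 1
  · have hp0 : p = 0 := by omega
    subst hp0
    rw [if_pos h1]
    exact pvRow_zero_left xs ys ys.length
  · rw [if_neg h1]
    by_cases h2 : p = 1
    · rw [if_pos h2]
      exact pvRow_zero xs ys 1
    · rw [if_neg h2]

theorem pvCast1 (k : Nat) : (1 : Int) + (k : Int) = ((k+1 : Nat) : Int) := by
  push_cast; ring

theorem pvA_inner (X Y : String) (n m : Nat) (_hn : n ≤ X.toList.length) (hm : m ≤ Y.toList.length)
    (k : Nat) (hk : k < n) :
    ∀ q, q ≤ m → ∀ r : Int,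
      (List.range q).foldl (fun st qq =>
        (fun (st : List (List Int) × Int) (j : Int) =>
          if PySem.Str.pyGet? X (((k+1 : Nat) : Int) - 1) = PySem.Str.pyGet? Y (j - 1) then
            let v := 1 + pvGet2 st.1 (((k+1 : Nat) : Int) - 1) (j - 1)
            (pvSet2 st.1 ((k+1 : Nat) : Int) j v, max st.2 v)
          else
            (pvSet2 st.1 ((k+1 : Nat) : Int) j (pvGet2 st.1 (((k+1 : Nat) : Int) - 1) j), st.2))
        st ((qq+1 : Nat) : Int))
        (pvPT (X.toList.take n) (Y.toList.take m) n (k+1) 0, r)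
      = (pvPT (X.toList.take n) (Y.toList.take m) n (k+1) q,
         (List.range q).foldl (pvRowStep (X.toList.take n) (Y.toList.take m) k) r) := by
  intro q
  induction q with
  | zero => intro _ r; simp
  | succ q ih =>
    intro hq r
    simp only [List.range_succ, List.foldl_append, List.foldl_cons, List.foldl_nil]
    rw [ih (by omega) r]
    have hylen : (Y.toList.take m).length = m := by rw [List.length_take]; omega
    have e1 : ((k+1 : Nat) : Int) - 1 = ((k : Nat) : Int) := by push_cast; ring
    have e2 : ((q+1 : Nat) : Int) - 1 = ((q : Nat) : Int) := by push_cast; ring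
    have e5 : PySem.Str.pyGet? X ((k : Nat) : Int) = (X.toList.take n)[k]? := by
      simp [PySem.Str.pyGet?, PySem.Chars.pyGet?, hk]
    have e6 : PySem.Str.pyGet? Y ((q : Nat) : Int) = (Y.toList.take m)[q]? := by
      simp [PySem.Str.pyGet?, PySem.Chars.pyGet?, (by omega : q < m)]
    have hread1 := pvPT_get_lt (X.toList.take n) (Y.toList.take m) n (k+1) q k q
      (by omega) (by omega) (by rw [hylen]; omega)
    have hread2 := pvPT_get_lt (X.toList.take n) (Y.toList.take m) n (k+1) q k (q+1)
      (by omega) (by omega) (by rw [hylen]; omega)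
    dsimp only
    simp only [e1, e2, e5, e6, hread1, hread2]
    by_cases hcond : (X.toList.take n)[k]? = (Y.toList.take m)[q]?
    · rw [if_pos hcond]
      have hstep : pvDP (X.toList.take n) (Y.toList.take m) (k+1) (q+1)
          = pvDP (X.toList.take n) (Y.toList.take m) k q + 1 := by
        simp only [pvDP, if_pos hcond]
      rw [pvPT_set (X.toList.take n) (Y.toList.take m) n k q hk (by rw [hylen]; omega)
        (1 + (pvDP (X.toList.take n) (Y.toList.take m) k q : Int))
        (by rw [hstep]; push_cast; ring)]
      rw [pvRowStep, if_pos hcond]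
    · rw [if_neg hcond]
      have hstep : pvDP (X.toList.take n) (Y.toList.take m) (k+1) (q+1)
          = pvDP (X.toList.take n) (Y.toList.take m) k (q+1) := by
        simp only [pvDP, if_neg hcond]
      rw [pvPT_set (X.toList.take n) (Y.toList.take m) n k q hk (by rw [hylen]; omega)
        ((pvDP (X.toList.take n) (Y.toList.take m) k (q+1) : Int))
        (by rw [hstep])]
      rw [pvRowStep, if_neg hcond]

theorem pvA_outer (X Y : String) (n m : Nat) (hn : n ≤ X.toList.length) (hm : m ≤ Y.toList.length) :
    ∀ k, k ≤ n →
      (List.range k).foldl (fun st kk =>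
        (PySem.List.pyRange 1 ((m : Int) + 1) 1).foldl
          (fun (st : List (List Int) × Int) (j : Int) =>
            if PySem.Str.pyGet? X (((kk+1 : Nat) : Int) - 1) = PySem.Str.pyGet? Y (j - 1) then
              let v := 1 + pvGet2 st.1 (((kk+1 : Nat) : Int) - 1) (j - 1)
              (pvSet2 st.1 ((kk+1 : Nat) : Int) j v, max st.2 v)
            else
              (pvSet2 st.1 ((kk+1 : Nat) : Int) j (pvGet2 st.1 (((kk+1 : Nat) : Int) - 1) j), st.2))
          st)
        (pvPT (X.toList.take n) (Y.toList.take m) n 1 0, 0)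
      = (pvPT (X.toList.take n) (Y.toList.take m) n (k+1) 0,
         pvRes (X.toList.take n) (Y.toList.take m) k) := by
  intro k
  induction k with
  | zero => intro _; simp [pvRes]
  | succ k ih =>
    intro hk
    simp only [List.range_succ, List.foldl_append, List.foldl_cons, List.foldl_nil]
    rw [ih (by omega)]
    have hylen : (Y.toList.take m).length = m := by rw [List.length_take]; omega
    rw [PySem.List.pyRange_one 1 ((m:Int)+1)]
    have hmt : (((m:Int)+1) - 1).toNat = m := by omega
    rw [hmt, List.foldl_map]
    simp only [pvCast1]
    rw [pvA_inner X Y n m hn hm k (by omega) m (le_refl m)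
      (pvRes (X.toList.take n) (Y.toList.take m) k)]
    have hroll : pvPT (X.toList.take n) (Y.toList.take m) n (k+1) m
        = pvPT (X.toList.take n) (Y.toList.take m) n (k+2) 0 := by
      have h := pvPT_roll (X.toList.take n) (Y.toList.take m) n (k+1)
      rw [hylen] at h
      exact h
    have hres : pvRes (X.toList.take n) (Y.toList.take m) (k+1)
        = (List.range m).foldl (pvRowStep (X.toList.take n) (Y.toList.take m) k)
            (pvRes (X.toList.take n) (Y.toList.take m) k) := by
      conv_lhs => rw [pvRes]
      rw [hylen]
    rw [hroll, ← hres]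

theorem pvA_eq_res (X Y : String) (N M : Int) (n m : Nat) (hN : N = (n : Int)) (hM : M = (m : Int))
    (hn : n ≤ X.toList.length) (hm : m ≤ Y.toList.length) :
    max_subsequence_substring X Y N M = pvRes (X.toList.take n) (Y.toList.take m) n := by
  subst hN hM
  unfold max_subsequence_substring
  have hylen : (Y.toList.take m).length = m := by rw [List.length_take]; omega
  have hdp0 : (PySem.List.pyRange 0 ((m:Int)+1) 1).map (fun _ => (0:Int))
      = List.replicate (m+1) 0 := by
    rw [List.map_const', PySem.List.length_pyRange_one]
    congr 1
  have hdp0' : (PySem.List.pyRange 0 ((n:Int)+1) 1).map (fun _ => List.replicate (m+1) (0:Int))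
      = List.replicate (n+1) (List.replicate (m+1) 0) := by
    rw [List.map_const', PySem.List.length_pyRange_one]
    congr 1
  have hinit : List.replicate (n+1) (List.replicate (m+1) (0:Int))
      = pvPT (X.toList.take n) (Y.toList.take m) n 1 0 := by
    rw [pvPT_init, hylen]
  dsimp only
  rw [hdp0, hdp0', hinit]
  rw [PySem.List.pyRange_one 1 ((n:Int)+1)]
  have hnt : (((n:Int)+1) - 1).toNat = n := by omega
  rw [hnt, List.foldl_map]
  simp only [pvCast1]
  rw [pvA_outer X Y n m hn hm n (le_refl n)]

-- ===== VERDICT (by name: the statement is the Claim_ definition above) =====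
theorem max_subsequence_substring_spec : Claim_equal_max_subsequence_substring := by
  intro X Y N M hDom hPre
  unfold Spec_max_subsequence_substring
  by_cases hM : M ≤ 0
  · have hA : max_subsequence_substring X Y N M = 0 := by
      unfold max_subsequence_substring
      simp only [PySem.List.pyRange_one_eq_nil (show (M:Int) + 1 ≤ 1 by omega), List.foldl_nil]
      rw [PySem.List.foldl_ignore]
    have hB : max_subsequence_substring_alt X Y N M = 0 := by
      unfold max_subsequence_substring_alt
      rw [if_pos (Or.inr hM)]
    rw [hA, hB]
  · 
    by_cases hN : N ≤ 0
    · have hA : max_subsequence_substring X Y N M = 0 := by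
        unfold max_subsequence_substring
        rw [PySem.List.pyRange_one_eq_nil (show (N:Int) + 1 ≤ 1 by omega)]
        rfl
      have hB : max_subsequence_substring_alt X Y N M = 0 := by
        unfold max_subsequence_substring_alt
        rw [if_pos (Or.inl hN)]
      rw [hA, hB]
    · 
      obtain ⟨hNX, hMY⟩ := hPre (by omega) (by omega)
      rw [PySem.Str.len_eq] at hNX hMY
      have hNn : N = (N.toNat : Int) := (Int.toNat_of_nonneg (by omega)).symm
      have hMm : M = (M.toNat : Int) := (Int.toNat_of_nonneg (by omega)).symm
      have hn : N.toNat ≤ X.toList.length := by omega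
      have hm : M.toNat ≤ Y.toList.length := by omega
      rw [pvA_eq_res X Y N M N.toNat M.toNat hNn hMm hn hm,
          pvAlt_eq_gFold X Y N M N.toNat M.toNat hNn hMm hn hm (by omega) (by omega)]
      have hxlen : (X.toList.take N.toNat).length = N.toNat := by
        rw [List.length_take]; omega
      have h := pvRes_eq_gFold (X.toList.take N.toNat) (Y.toList.take M.toNat)
      rw [hxlen] at h
      exact h
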